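-- pv_equiv track=rewrite | github.com/miliar/Code_Jam_Webscraper | solutions_python/Problem_142/723.py | genTrans
-- ===== SOURCE A (Python) =====
-- import itertools
--
-- def compress(s):
--     res = ''.join(c for c, _ in itertools.groupby(s))
--     return res
--
-- def mycount(s):
--     res = []
--     compressed = compress(s)
--     i = 0
--     count = 0
--     for j in range(len(s)):
--         if s[j] == compressed[i]:
--             count += 1
--         else:
--             res.append(count)
--             count = 1
--             i+=1
--     res.append(count)
--     return res
--
-- def findMaxCount(strings):
--     res = mycount(compress(strings[0]))
--     for s in strings:
--         c = mycount(s)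
--         for i in range(len(res)):
--             if res[i] < c[i]:
--                 res[i] = c[i]
--     return res
--
-- def genTrans(strings):
--     res = []
--     counts = findMaxCount(strings)
--     compressed = mycount(compress(strings[0]))
--     current = compressed
--     res.append(list(current))
--     while current != counts:
--         for i in range(len(current)):
--             if current[i] < counts[i]:
--                 current[i] = current[i] + 1
--                 for j in range(i):
--                     current[j] = 1
--                 break
--         #generate string
--         res.append(list(current))
--     return res
-- ===== SOURCE B (Python) =====
-- import itertools
--
-- def compress(s):
--     res = ''.join(c for c, _ in itertools.groupby(s))
--     return res
--
-- def mycount(s):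
--     res = []
--     compressed = compress(s)
--     i = 0
--     count = 0
--     for j in range(len(s)):
--         if s[j] == compressed[i]:
--             count += 1
--         else:
--             res.append(count)
--             count = 1
--             i+=1
--     res.append(count)
--     return res
--
-- def findMaxCount(strings):
--     res = mycount(compress(strings[0]))
--     for s in strings:
--         c = mycount(s)
--         for i in range(len(res)):
--             if res[i] < c[i]:
--                 res[i] = c[i]
--     return res
--
-- def genTrans(strings):
--     # mixed-radix rank decoding instead of the in-place carry loop
--     counts = findMaxCount(strings)
--     start = mycount(compress(strings[0]))
--     bases = [c - s + 1 for c, s in zip(counts, start)]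
--     total = 1
--     for b in bases:
--         total *= b
--     res = []
--     for r in range(total):
--         v = []
--         for s, b in zip(start, bases):
--             d = r % b
--             r = r // b
--             v.append(s + d)
--         res.append(v)
--     return res
-- ===== Notes on version B (the rewrite author's own statement) =====
-- stated objective: alternative
-- what changed: replaces the in-place carry/increment while-loop over the current vector with mixed-radix rank decoding: compute the product of the per-position bases and decode each rank 0..total-1 by repeated divmod
import Mathlib
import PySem

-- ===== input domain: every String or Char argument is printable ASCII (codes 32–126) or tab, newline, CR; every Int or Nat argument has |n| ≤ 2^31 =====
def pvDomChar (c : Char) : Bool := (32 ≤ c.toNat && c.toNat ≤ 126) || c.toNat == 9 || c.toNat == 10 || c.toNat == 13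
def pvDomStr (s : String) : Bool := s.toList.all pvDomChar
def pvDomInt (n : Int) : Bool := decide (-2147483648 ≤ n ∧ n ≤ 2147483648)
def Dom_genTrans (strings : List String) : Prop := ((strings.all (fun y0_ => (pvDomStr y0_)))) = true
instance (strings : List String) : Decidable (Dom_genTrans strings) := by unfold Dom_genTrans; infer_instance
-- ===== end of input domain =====

-- B replaces A's in-place carry/increment while-loop with mixed-radix rank decoding
-- (decode each rank 0..total-1 by repeated divmod); equal cost, different algorithm.

-- ===== PORT A =====
-- compress(s): ''.join(c for c,_ in groupby(s)) — drop repeated adjacent chars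
def dedupA : List Char → List Char
  | [] => []
  | [c] => [c]
  | a :: b :: t => if a = b then dedupA (b :: t) else a :: dedupA (b :: t)

-- mycount(s): run lengths of s, scanning s while tracking the current group index i
-- (s[j] == compressed[i]); the fold state is (i, count, res).
def mycountA (s : List Char) : List Int :=
  let compressed := dedupA s
  let st := s.foldl
    (fun (st : Int × Int × List Int) ch =>
      if PySem.List.pyGet? compressed st.1 = some ch then (st.1, st.2.1 + 1, st.2.2)
      else (st.1 + 1, 1, st.2.2 ++ [st.2.1]))
    (0, 0, ([] : List Int))
  st.2.2 ++ [st.2.1]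

-- inner loop of findMaxCount: res[i] := max(res[i], c[i]) for i < len(res)
-- (Python raises IndexError when c is shorter than res; there Pre_ fails and we keep rs)
def updA : List Int → List Int → List Int
  | [], _ => []
  | rs, [] => rs
  | r :: rs, c :: cs => (if r < c then c else r) :: updA rs cs

def findMaxCountA : List String → List Int
  | [] => []
  | s0 :: rest =>
    (s0 :: rest).foldl (fun res s => updA res (mycountA s.toList)) (mycountA (dedupA s0.toList))

-- the for-i ... break body: first index with room is incremented, lower positions reset to 1
def incrA : List Int → List Int → Option (List Int)
  | [], _ => none
  | _, [] => none
  | c :: cs, m :: ms =>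
    if c < m then some ((c + 1) :: cs) else (incrA cs ms).map (fun l => 1 :: l)

-- the while loop, with a fuel bound as a pure totality guard (Python's loop terminates
-- whenever it returns; `none` from incrA would be a Python infinite loop)
def loopA : Nat → List Int → List Int → List (List Int)
  | 0, _, _ => []
  | fuel + 1, cur, cnt =>
    if cur = cnt then []
    else
      match incrA cur cnt with
      | none => []
      | some c' => c' :: loopA fuel c' cnt

def genTrans (strings : List String) : List (List Int) :=
  match strings with
  | [] => []  -- Python raises IndexError on strings[0]; excluded by Pre_
  | s0 :: rest =>
    let counts := findMaxCountA (s0 :: rest)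
    let start := mycountA (dedupA s0.toList)
    let fuel := (counts.map (fun c => (c + 1).toNat)).prod
    start :: loopA fuel start counts

-- ===== PORT B =====
-- decode a rank into a vector, least-significant position first: d = r % b; r //= b; v.append(s+d)
def decodeB : Int → List (Int × Int) → List Int
  | _, [] => []
  | r, (s, b) :: t => (s + PySem.Int.mod r b) :: decodeB (PySem.Int.floordiv r b) t

def genTrans_alt (strings : List String) : List (List Int) :=
  match strings with
  | [] => []  -- Python raises IndexError on strings[0]; excluded by Pre_
  | s0 :: rest =>
    let counts := findMaxCountA (s0 :: rest)
    let start := mycountA (dedupA s0.toList)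
    let bases := List.zipWith (fun c s => c - s + 1) counts start
    let total := bases.foldl (· * ·) 1
    (PySem.List.pyRange 0 total 1).map (fun r => decodeB r (start.zip bases))

-- ===== PRECONDITION & SPEC =====
-- length of mycount(s) in Python: the number of maximal runs of equal adjacent
-- characters, i.e. 1 + the number of adjacent positions whose characters differ
-- (mycount('') = [0] also has length 1)
def glen (s : String) : Nat :=
  1 + (s.toList.zip s.toList.tail).countP (fun p => decide (p.1 ≠ p.2))

-- Pre_ excludes exactly the inputs where Python A raises IndexError: the empty list
-- (strings[0]) and lists where some string has fewer character groups than strings[0]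
-- (c[i] in findMaxCount).
def Pre_genTrans (strings : List String) : Prop :=
  strings ≠ [] ∧ ∀ s ∈ strings, glen strings.headI ≤ glen s
instance (strings : List String) : Decidable (Pre_genTrans strings) := by
  unfold Pre_genTrans; infer_instance

def pvWitness_genTrans : List String := ["ab", "aabb"]

def Spec_genTrans (strings : List String) (out : List (List Int)) : Prop := out = genTrans_alt strings
instance (strings : List String) (out : List (List Int)) : Decidable (Spec_genTrans strings out) := by unfold Spec_genTrans; infer_instance

-- ===== CLAIM (what is proved, stated in full; the proofs are below) =====
def Claim_equal_genTrans : Prop := ∀ (strings : List String), Dom_genTrans strings → Pre_genTrans strings → Spec_genTrans strings (genTrans strings)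

-- ===== LEMMAS AND PROOFS =====

theorem dedup_head? : ∀ (x : Char) (xs : List Char), (dedupA (x :: xs)).head? = some x := by
  intro x xs
  induction xs generalizing x with
  | nil => rfl
  | cons b t ih =>
    by_cases h : x = b
    · simp only [dedupA, if_pos h]; rw [h]; exact ih b
    · simp [dedupA, h]

theorem dedup_chain : ∀ (l : List Char), (dedupA l).IsChain (· ≠ ·) := by
  intro l
  induction l using dedupA.induct with
  | case1 => exact .nil
  | case2 c => exact .singleton _
  | case3 a t ih => simpa [dedupA] using ih
  | case4 a b t h ih =>
    simp only [dedupA, if_neg h]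
    rw [List.isChain_cons]
    refine ⟨?_, ih⟩
    intro y hy
    rw [dedup_head? b t] at hy
    simp at hy
    subst hy; exact h

theorem chain_dedup_eq : ∀ (l : List Char), l.IsChain (· ≠ ·) → dedupA l = l := by
  intro l
  induction l using dedupA.induct with
  | case1 => intro _; rfl
  | case2 c => intro _; rfl
  | case3 a t ih => intro hc; rw [List.isChain_cons] at hc; exact absurd rfl (hc.1 a (by simp))
  | case4 a b t h ih =>
    intro hc; rw [List.isChain_cons] at hc
    simp only [dedupA, if_neg h, ih hc.2]


theorem mycount_aux (t : List Char) (hch : t.IsChain (· ≠ ·)) :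
    ∀ (v u : List Char), u ≠ [] → t = u ++ v →
    List.foldl
      (fun (st : Int × Int × List Int) ch =>
        if PySem.List.pyGet? (dedupA t) st.1 = some ch then (st.1, st.2.1 + 1, st.2.2)
        else (st.1 + 1, 1, st.2.2 ++ [st.2.1]))
      ((u.length : Int) - 1, 1, List.replicate (u.length - 1) 1) v
    = ((t.length : Int) - 1, 1, List.replicate (t.length - 1) 1) := by
  intro v
  induction v with
  | nil => intro u hu ht; subst ht; simp
  | cons c v' ih =>
    intro u hu ht
    have hdt : dedupA t = t := chain_dedup_eq t hch
    have hulen : 1 ≤ u.length := List.length_pos_iff.mpr hu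
    have hcast : (u.length : Int) - 1 = ((u.length - 1 : Nat) : Int) := by omega
    have hget : PySem.List.pyGet? (dedupA t) ((u.length : Int) - 1) = u.getLast? := by
      rw [hdt, hcast, PySem.List.pyGet?_natCast, ht,
        List.getElem?_append_left (by omega), List.getLast?_eq_getElem?]
    obtain ⟨z, hz⟩ := List.getLast?_isSome.mpr hu |> Option.isSome_iff_exists.mp
    have hne : z ≠ c := by
      rw [ht] at hch
      rcases List.isChain_append.mp hch with ⟨-, -, hrel⟩
      exact hrel z hz c rfl
    simp only [List.foldl_cons]
    rw [hget, hz, if_neg (by simp [hne])]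
    have e1 : ((u.length : Int) - 1 + 1) = (((u ++ [c]).length : Int) - 1) := by simp
    have e2 : List.replicate (u.length - 1) (1 : Int) ++ [1]
        = List.replicate ((u ++ [c]).length - 1) 1 := by
      rw [← List.replicate_succ']
      congr 1
      simp
      omega
    rw [e1, e2]
    exact ih (u ++ [c]) (by simp) (by rw [ht, List.append_assoc]; rfl)

theorem mycount_chain (t : List Char) (hch : t.IsChain (· ≠ ·)) (hne : t ≠ []) :
    mycountA t = List.replicate t.length 1 := by
  obtain ⟨x, xs, rfl⟩ := List.exists_cons_of_ne_nil hne
  unfold mycountA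
  simp only [List.foldl_cons]
  have hdt : dedupA (x :: xs) = x :: xs := chain_dedup_eq _ hch
  have hstep0 : (if PySem.List.pyGet? (dedupA (x :: xs)) (0 : Int) = some x
      then ((0 : Int), (0 : Int) + 1, ([] : List Int))
      else ((0 : Int) + 1, 1, ([] : List Int) ++ [(0 : Int)]))
      = (((0:Int)), (1:Int), ([] : List Int)) := by
    rw [hdt, if_pos (by simp)]
    norm_num
  rw [hstep0]
  have haux := mycount_aux (x :: xs) hch xs [x] (by simp) rfl
  norm_num at haux ⊢
  rw [haux, List.replicate_succ']


theorem updA_forall₂ : ∀ (rs cs : List Int), List.Forall₂ (· ≤ ·) rs (updA rs cs) := by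
  intro rs
  induction rs with
  | nil => intro cs; exact .nil
  | cons r rs ih =>
    intro cs
    cases cs with
    | nil => exact List.forall₂_refl _
    | cons c cs => exact List.Forall₂.cons (by split <;> omega) (ih cs)

theorem forall₂_le_trans {a b c : List Int} (h1 : List.Forall₂ (· ≤ ·) a b)
    (h2 : List.Forall₂ (· ≤ ·) b c) : List.Forall₂ (· ≤ ·) a c := by
  induction h1 generalizing c with
  | nil => cases h2; exact .nil
  | cons hab _ ih =>
    cases h2 with
    | cons hbc htl => exact .cons (le_trans hab hbc) (ih htl)

theorem foldl_upd_forall₂ (f : String → List Int) (l : List String) :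
    ∀ (start r : List Int), List.Forall₂ (· ≤ ·) start r →
    List.Forall₂ (· ≤ ·) start (l.foldl (fun res s => updA res (f s)) r) := by
  induction l with
  | nil => intro start r h; exact h
  | cons s l ih =>
    intro start r h
    exact ih start _ (forall₂_le_trans h (updA_forall₂ r (f s)))

-- ===== decode side =====

def totP (P : List (Int × Int)) : Int := (P.map Prod.snd).prod
def maxsP (P : List (Int × Int)) : List Int := P.map (fun p => p.1 + p.2 - 1)

theorem totP_cons (p : Int × Int) (t : List (Int × Int)) : totP (p :: t) = p.2 * totP t := by
  simp [totP]

theorem totP_pos (P : List (Int × Int)) (hb : ∀ p ∈ P, 1 ≤ p.2) : 1 ≤ totP P := by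
  induction P with
  | nil => simp [totP]
  | cons p t ih =>
    have h1 := hb p (by simp)
    have h2 : 1 ≤ totP t := ih (fun q hq => hb q (by simp [hq]))
    have := mul_le_mul h1 h2 (by omega) (by omega)
    simpa [totP] using this

theorem decode_cons (s b : Int) (hb : 0 < b) (t : List (Int × Int)) (r : Int) :
    decodeB r ((s, b) :: t) = (s + r % b) :: decodeB (r / b) t := by
  simp [decodeB, PySem.Int.mod_eq_emod_of_pos hb, PySem.Int.floordiv_eq_ediv_of_pos hb]

theorem emod_char (b q ρ : Int) (h0 : 0 ≤ ρ) (h1 : ρ < b) : (b * q + ρ) % b = ρ := by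
  rw [add_comm, Int.add_mul_emod_self_left, Int.emod_eq_of_lt h0 h1]

theorem ediv_char (b q ρ : Int) (h0 : 0 ≤ ρ) (h1 : ρ < b) : (b * q + ρ) / b = q := by
  rw [add_comm, Int.add_mul_ediv_left _ _ (by omega : b ≠ 0), Int.ediv_eq_zero_of_lt h0 h1, zero_add]

theorem decode_zero (P : List (Int × Int)) (hb : ∀ p ∈ P, 1 ≤ p.2) :
    decodeB 0 P = P.map Prod.fst := by
  induction P with
  | nil => rfl
  | cons p t ih =>
    obtain ⟨s, b⟩ := p
    have h1 : (1:Int) ≤ b := hb (s, b) (by simp)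
    rw [decode_cons s b (by omega) t 0, Int.zero_emod, Int.zero_ediv,
      ih (fun q hq => hb q (by simp [hq]))]
    simp

theorem decode_last (P : List (Int × Int)) (hb : ∀ p ∈ P, 1 ≤ p.2) :
    decodeB (totP P - 1) P = maxsP P := by
  induction P with
  | nil => rfl
  | cons p t ih =>
    obtain ⟨s, b⟩ := p
    have h1 : (1:Int) ≤ b := hb (s, b) (by simp)
    have hbt : ∀ q ∈ t, (1:Int) ≤ q.2 := fun q hq => hb q (by simp [hq])
    have hT : 1 ≤ totP t := totP_pos t hbt
    have hsplit : totP ((s, b) :: t) - 1 = b * (totP t - 1) + (b - 1) := by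
      rw [totP_cons]; ring
    rw [decode_cons s b (by omega) t _, hsplit,
      emod_char b _ _ (by omega) (by omega), ediv_char b _ _ (by omega) (by omega), ih hbt]
    simp [maxsP]
    omega

theorem decode_inj (P : List (Int × Int)) (hb : ∀ p ∈ P, 1 ≤ p.2) :
    ∀ (r r' : Int), 0 ≤ r → r < totP P → 0 ≤ r' → r' < totP P →
    decodeB r P = decodeB r' P → r = r' := by
  induction P with
  | nil => intro r r' h1 h2 h3 h4 _; simp [totP] at h2 h4; omega
  | cons p t ih =>
    intro r r' h1 h2 h3 h4 heq
    obtain ⟨s, b⟩ := p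
    have hb1 : (1:Int) ≤ b := hb (s, b) (by simp)
    have hbt : ∀ q ∈ t, (1:Int) ≤ q.2 := fun q hq => hb q (by simp [hq])
    rw [decode_cons s b (by omega) t r, decode_cons s b (by omega) t r'] at heq
    simp only [List.cons.injEq] at heq
    have hmod : r % b = r' % b := by omega
    rw [totP_cons] at h2 h4
    have hq : r / b = r' / b := by
      refine ih hbt (r / b) (r' / b) (Int.ediv_nonneg h1 (by omega)) ?_
        (Int.ediv_nonneg h3 (by omega)) ?_ heq.2
      · exact (Int.ediv_lt_iff_lt_mul (by omega)).mpr (by rw [mul_comm]; exact h2)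
      · exact (Int.ediv_lt_iff_lt_mul (by omega)).mpr (by rw [mul_comm]; exact h4)
    have e1 := Int.mul_ediv_add_emod r b
    have e2 := Int.mul_ediv_add_emod r' b
    rw [hq] at e1
    omega


theorem decode_step (P : List (Int × Int)) (hb : ∀ p ∈ P, 1 ≤ p.2)
    (hs : ∀ p ∈ P.dropLast, p.1 = 1) :
    ∀ (r : Int), 0 ≤ r → r + 1 < totP P →
    incrA (decodeB r P) (maxsP P) = some (decodeB (r + 1) P) := by
  induction P with
  | nil => intro r h1 h2; simp [totP] at h2; omega
  | cons p t ih =>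
    intro r h1 h2
    obtain ⟨s, b⟩ := p
    have hb1 : (1:Int) ≤ b := hb (s, b) (by simp)
    have hbt : ∀ q ∈ t, (1:Int) ≤ q.2 := fun q hq => hb q (by simp [hq])
    have hT : 1 ≤ totP t := totP_pos t hbt
    rw [totP_cons] at h2
    have h2' : r + 1 < b * totP t := h2
    have hmb : 0 ≤ r % b ∧ r % b < b := ⟨Int.emod_nonneg r (by omega), Int.emod_lt_of_pos r (by omega)⟩
    rw [decode_cons s b (by omega) t r, decode_cons s b (by omega) t (r + 1)]
    simp only [maxsP, List.map_cons, incrA]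
    by_cases hlt : s + r % b < s + b - 1
    · rw [if_pos hlt]
      have e1 : (r + 1) % b = r % b + 1 := by
        have := Int.mul_ediv_add_emod r b
        have h1 : r + 1 = b * (r / b) + (r % b + 1) := by omega
        rw [h1, emod_char b _ _ (by omega) (by omega)]
      have e2 : (r + 1) / b = r / b := by
        have := Int.mul_ediv_add_emod r b
        have h1 : r + 1 = b * (r / b) + (r % b + 1) := by omega
        rw [h1, ediv_char b _ _ (by omega) (by omega)]
      rw [e1, e2]
      congr 2
      omega
    · -- r % b = b - 1 : carry
      have hmb' : r % b = b - 1 := by omega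
      rw [if_neg hlt]
      have hr0 : 0 ≤ r / b := Int.ediv_nonneg h1 (by omega)
      have hq0 : 0 ≤ b * (r / b) := mul_nonneg (by omega) hr0
      have htne : t ≠ [] := by
        rintro rfl
        simp [totP] at h2' hT
        have := Int.mul_ediv_add_emod r b
        omega
      have hs1 : s = 1 := by
        apply hs (s, b)
        cases t with
        | nil => exact absurd rfl htne
        | cons q t' => simp [List.dropLast_cons₂]
      have hst : ∀ p ∈ t.dropLast, p.1 = 1 := by
        intro p hp
        apply hs p
        cases t with
        | nil => exact absurd rfl htne
        | cons q t' => simp only [List.dropLast_cons₂, List.mem_cons]; right; exact hp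
      have hdiv : r = b * (r / b) + (b - 1) := by
        have := Int.mul_ediv_add_emod r b
        omega
      have hmul : b * (r / b + 1) = b * (r / b) + b := by ring
      have hbound : r / b + 1 < totP t := by
        have h3 : r + 1 = b * (r / b + 1) := by omega
        have : b * (r / b + 1) < b * totP t := by omega
        exact lt_of_mul_lt_mul_left this (by omega)
      have hihp := ih hbt hst (r / b) hr0 hbound
      simp only [maxsP] at hihp
      rw [hihp]
      have e1 : (r + 1) % b = 0 := by
        have h3 : r + 1 = b * (r / b + 1) + 0 := by rw [hmul]; omega
        rw [h3, emod_char b _ _ (by omega) (by omega)]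
      have e2 : (r + 1) / b = r / b + 1 := by
        have h3 : r + 1 = b * (r / b + 1) + 0 := by rw [hmul]; omega
        rw [h3, ediv_char b _ _ (by omega) (by omega)]
      rw [e1, e2]
      simp [hs1]
theorem loop_eq (P : List (Int × Int)) (hb : ∀ p ∈ P, 1 ≤ p.2)
    (hs : ∀ p ∈ P.dropLast, p.1 = 1) :
    ∀ (fuel : Nat) (r : Int), 0 ≤ r → r < totP P → (totP P - 1 - r).toNat ≤ fuel →
    loopA fuel (decodeB r P) (maxsP P)
      = (PySem.List.pyRange (r + 1) (totP P) 1).map (fun x => decodeB x P) := by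
  intro fuel
  induction fuel with
  | zero =>
    intro r h0 h1 hf
    have hr : r = totP P - 1 := by omega
    subst hr
    rw [PySem.List.pyRange_one]
    simp [loopA]
  | succ fuel ih =>
    intro r h0 h1 hf
    by_cases hlast : r = totP P - 1
    · subst hlast
      rw [decode_last P hb]
      simp only [loopA]
      rw [PySem.List.pyRange_one]
      simp
    · have hne : decodeB r P ≠ maxsP P := by
        intro h
        rw [← decode_last P hb] at h
        have := decode_inj P hb r (totP P - 1) h0 h1 (by have := totP_pos P hb; omega) (by omega) h
        omega
      simp only [loopA, if_neg hne]
      rw [decode_step P hb hs r h0 (by omega)]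
      show decodeB (r + 1) P :: loopA fuel (decodeB (r + 1) P) (maxsP P) = _
      have ha1 : (0:Int) ≤ r + 1 := by omega
      have ha2 : r + 1 < totP P := by omega
      have ha3 : (totP P - 1 - (r + 1)).toNat ≤ fuel := by omega
      rw [PySem.List.pyRange_one_cons (show r + 1 < totP P by omega), List.map_cons,
        ih (r + 1) ha1 ha2 ha3]

theorem zipP_fst : ∀ (a b : List Int), a.length = b.length →
    (List.zipWith (fun s c => (s, c - s + 1)) a b).map Prod.fst = a := by
  intro a
  induction a with
  | nil => intro b h; simp
  | cons x a ih =>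
    intro b h
    cases b with
    | nil => simp at h
    | cons y b => simp_all

theorem zipP_maxs : ∀ (a b : List Int), a.length = b.length →
    maxsP (List.zipWith (fun s c => (s, c - s + 1)) a b) = b := by
  intro a
  induction a with
  | nil => intro b h; simp at h; rw [List.eq_nil_of_length_eq_zero h.symm]; simp [maxsP]
  | cons x a ih =>
    intro b h
    cases b with
    | nil => simp at h
    | cons y b =>
      simp only [List.zipWith_cons_cons, maxsP, List.map_cons, List.cons.injEq]
      refine ⟨by omega, ?_⟩
      have := ih b (by simpa using h)
      simpa [maxsP] using this

theorem zipP_snd : ∀ (a b : List Int), a.length = b.length →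
    (List.zipWith (fun s c => (s, c - s + 1)) a b).map Prod.snd
      = List.zipWith (fun c s => c - s + 1) b a := by
  intro a
  induction a with
  | nil => intro b h; simp at h; rw [List.eq_nil_of_length_eq_zero h.symm]; simp
  | cons x a ih =>
    intro b h
    cases b with
    | nil => simp at h
    | cons y b => simp_all

theorem zipP_zip : ∀ (a b : List Int), a.length = b.length →
    a.zip (List.zipWith (fun c s => c - s + 1) b a)
      = List.zipWith (fun s c => (s, c - s + 1)) a b := by
  intro a
  induction a with
  | nil => intro b h; simp
  | cons x a ih =>
    intro b h
    cases b with
    | nil => simp at h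
    | cons y b => simp_all [List.zip]

theorem zipP_hb {a b : List Int} (h : List.Forall₂ (· ≤ ·) a b) :
    ∀ p ∈ List.zipWith (fun s c => (s, c - s + 1)) a b, 1 ≤ p.2 := by
  induction h with
  | nil => simp
  | cons hxy htl ih =>
    intro p hp
    simp only [List.zipWith_cons_cons, List.mem_cons] at hp
    rcases hp with rfl | hp
    · simp; omega
    · exact ih p hp

theorem zipP_mem_fst : ∀ (a b : List Int),
    ∀ p ∈ List.zipWith (fun s c => (s, c - s + 1)) a b, p.1 ∈ a := by
  intro a
  induction a with
  | nil => simp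
  | cons x a ih =>
    intro b p hp
    cases b with
    | nil => simp at hp
    | cons y b =>
      simp only [List.zipWith_cons_cons, List.mem_cons] at hp
      rcases hp with rfl | hp
      · simp
      · simp only [List.mem_cons]; right; exact ih b p hp

theorem tot_le {a b : List Int} (h : List.Forall₂ (· ≤ ·) a b) (ha : ∀ x ∈ a, 0 ≤ x) :
    totP (List.zipWith (fun s c => (s, c - s + 1)) a b)
      ≤ ((b.map (fun c => (c + 1).toNat)).prod : Int) := by
  induction h with
  | nil => simp [totP]
  | @cons x y a b hxy htl ih =>
    have hx0 : 0 ≤ x := ha x (by simp)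
    have ihh := ih (fun z hz => ha z (by simp [hz]))
    have hpos : 1 ≤ totP (List.zipWith (fun s c => (s, c - s + 1)) a b) :=
      totP_pos _ (zipP_hb htl)
    simp only [List.zipWith_cons_cons, totP_cons, List.map_cons, List.prod_cons]
    have hy : ((y + 1).toNat : Int) = y + 1 := Int.toNat_of_nonneg (by omega)
    rw [hy]
    have h1 : y - x + 1 ≤ y + 1 := by omega
    calc (y - x + 1) * totP (List.zipWith (fun s c => (s, c - s + 1)) a b)
        ≤ (y + 1) * totP (List.zipWith (fun s c => (s, c - s + 1)) a b) := by
          apply mul_le_mul_of_nonneg_right h1 (by omega)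
      _ ≤ (y + 1) * ((b.map (fun c => (c + 1).toNat)).prod : Int) := by
          apply mul_le_mul_of_nonneg_left ihh (by omega)

theorem start_shape (s0 : String) :
    mycountA (dedupA s0.toList) = [0] ∨
      ∃ n : Nat, 1 ≤ n ∧ mycountA (dedupA s0.toList) = List.replicate n 1 := by
  cases hsl : s0.toList with
  | nil => left; rfl
  | cons x xs =>
    right
    rw [← hsl]
    have hch := dedup_chain s0.toList
    have hne : dedupA s0.toList ≠ [] := by
      rw [hsl]
      intro hcon
      have hh := dedup_head? x xs
      rw [hcon] at hh
      simp at hh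
    refine ⟨(dedupA s0.toList).length, List.length_pos_iff.mpr hne, ?_⟩
    exact mycount_chain _ hch hne

theorem main_eq (s0 : String) (rest : List String) :
    genTrans (s0 :: rest) = genTrans_alt (s0 :: rest) := by
  simp only [genTrans, genTrans_alt, findMaxCountA]
  set start := mycountA (dedupA s0.toList) with hstartdef
  set counts := (s0 :: rest).foldl (fun res s => updA res (mycountA s.toList)) start
    with hcountsdef
  have hstart := start_shape s0
  rw [← hstartdef] at hstart
  have hf2 : List.Forall₂ (· ≤ ·) start counts :=
    foldl_upd_forall₂ _ (s0 :: rest) start start (List.forall₂_refl _)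
  have hlen : start.length = counts.length := List.Forall₂.length_eq hf2
  set P := List.zipWith (fun s c => (s, c - s + 1)) start counts with hPdef
  have hb : ∀ p ∈ P, 1 ≤ p.2 := zipP_hb hf2
  have hs : ∀ p ∈ P.dropLast, p.1 = 1 := by
    rcases hstart with h0 | ⟨n, hn1, hrep⟩
    · intro p hp
      exfalso
      have hs1 : start.length = 1 := by rw [h0]; rfl
      have hPlen : P.length = 1 := by
        rw [hPdef, List.length_zipWith]
        omega
      have hd0 : P.dropLast.length = 0 := by rw [List.length_dropLast, hPlen]
      rw [List.eq_nil_of_length_eq_zero hd0] at hp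
      simp at hp
    · intro p hp
      have hpP : p ∈ P := List.dropLast_subset _ hp
      have hmem := zipP_mem_fst start counts p hpP
      rw [hrep] at hmem
      exact List.eq_of_mem_replicate hmem
  have ha0 : ∀ x ∈ start, 0 ≤ x := by
    rcases hstart with h0 | ⟨n, hn1, hrep⟩
    · rw [h0]; intro x hx; simp at hx; omega
    · rw [hrep]; intro x hx; have := List.eq_of_mem_replicate hx; omega
  have hT1 : 1 ≤ totP P := totP_pos P hb
  have hzip : start.zip (List.zipWith (fun c s => c - s + 1) counts start) = P :=
    zipP_zip start counts hlen
  have hbases : (List.zipWith (fun c s => c - s + 1) counts start).foldl (· * ·) 1 = totP P := by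
    rw [← zipP_snd start counts hlen, ← hPdef]
    exact List.prod_eq_foldl.symm
  rw [hzip, hbases]
  rw [PySem.List.pyRange_one_cons (show (0 : Int) < totP P by omega), List.map_cons]
  have hd0 : decodeB 0 P = start := by rw [decode_zero P hb, hPdef, zipP_fst start counts hlen]
  congr 1
  · exact hd0.symm
  · have hfuel : (totP P - 1 - 0).toNat ≤ (counts.map (fun c => (c + 1).toNat)).prod := by
      rw [Int.toNat_le]
      have htl := tot_le hf2 ha0
      rw [← hPdef] at htl
      have hcastp : ((((counts.map (fun c => (c + 1).toNat)).prod : Nat)) : Int)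
          = (counts.map (fun c => (((c + 1).toNat : Nat) : Int))).prod := by
        push_cast [List.map_map]
        rfl
      rw [hcastp]
      omega
    have hl := loop_eq P hb hs ((counts.map (fun c => (c + 1).toNat)).prod) 0 le_rfl
      (by omega) hfuel
    rw [hd0, hPdef, zipP_maxs start counts hlen, ← hPdef] at hl
    exact hl

-- ===== VERDICT (by name: the statement is the Claim_ definition above) =====
theorem genTrans_spec : Claim_equal_genTrans := by
  intro strings _hdom hpre
  unfold Spec_genTrans
  match strings with
  | [] => exact absurd rfl hpre.1
  | s0 :: rest => exact main_eq s0 rest
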